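-- pv_equiv track=rewrite | github.com/tannergz123/CSCE_420_AI | programming_assignment_2/GenerateQueensKB.py | generate_n_queens_kb
-- ===== SOURCE A (Python) =====
-- def generate_n_queens_kb(n):
--     kb = []
--
--     # Generate clauses for at least one queen in each row and column
--     for i in range(1, n + 1):
--         # Rows
--         row_clause = '(or ' + \
--             ' '.join([f'Q{i}{j}' for j in range(1, n + 1)]) + ')'
--         kb.append(row_clause)
--
--         # Columns
--         col_clause = '(or ' + \
--             ' '.join([f'Q{j}{i}' for j in range(1, n + 1)]) + ')'
--         kb.append(col_clause)
--
--     # Generate clauses for no two queens in the same row or column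
--     for i in range(1, n + 1):
--         for j in range(1, n):
--             for k in range(j + 1, n + 1):
--                 # Rows
--                 kb.append(f'(or (not Q{i}{j}) (not Q{i}{k}))')
--                 # Columns
--                 kb.append(f'(or (not Q{j}{i}) (not Q{k}{i}))')
--
--     # Generate clauses for no two queens in the same diagonal
--     for i in range(1, n + 1):
--         for j in range(1, n + 1):
--             for k in range(1, n + 1):
--                 for l in range(1, n + 1):
--                     if abs(i - k) == abs(j - l) and (i != k and j != l):
--                         kb.append(f'(or (not Q{i}{j}) (not Q{k}{l}))')
--
--     return kb
-- ===== SOURCE B (Python) =====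
-- def generate_n_queens_kb(n):
--     rng = range(1, n + 1)
--
--     def excl(a, b):
--         return f'(or (not {a}) (not {b}))'
--
--     # three clause lists built as comprehensions and concatenated
--     part1 = [clause
--              for i in rng
--              for clause in ('(or ' + ' '.join(f'Q{i}{j}' for j in rng) + ')',
--                             '(or ' + ' '.join(f'Q{j}{i}' for j in rng) + ')')]
--     part2 = [clause
--              for i in rng
--              for j in range(1, n)
--              for k in range(j + 1, n + 1)
--              for clause in (excl(f'Q{i}{j}', f'Q{i}{k}'),
--                             excl(f'Q{j}{i}', f'Q{k}{i}'))]
--     # diagonals: only columns l = j - |i-k| and l = j + |i-k| can conflict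
--     part3 = [excl(f'Q{i}{j}', f'Q{k}{l}')
--              for i in rng
--              for j in rng
--              for k in rng
--              if k != i
--              for l in (j - abs(i - k), j + abs(i - k))
--              if 1 <= l <= n]
--     return part1 + part2 + part3
-- ===== Notes on version B (the rewrite author's own statement) =====
-- stated objective: faster
-- what changed: B builds the KB as three separate comprehension-style lists concatenated at the end (no shared accumulator), and generates the diagonal clauses by computing for each cell (i,j) and other row k the only two conflicting columns l = j ± |i-k| (O(n^3)) instead of A's O(n^4) scan over all cell pairs with an |i-k|==|j-l| test.
import Mathlib
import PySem

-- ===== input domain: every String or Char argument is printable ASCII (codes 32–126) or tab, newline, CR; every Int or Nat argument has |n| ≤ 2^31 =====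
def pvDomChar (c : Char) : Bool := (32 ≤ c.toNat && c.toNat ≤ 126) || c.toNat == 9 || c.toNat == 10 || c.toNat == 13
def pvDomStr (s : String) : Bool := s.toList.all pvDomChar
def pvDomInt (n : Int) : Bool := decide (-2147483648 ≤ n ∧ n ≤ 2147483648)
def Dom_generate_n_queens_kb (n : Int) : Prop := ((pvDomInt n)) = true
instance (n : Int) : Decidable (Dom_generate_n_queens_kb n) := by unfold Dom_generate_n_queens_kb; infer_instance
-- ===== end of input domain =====

-- B builds three comprehension-style lists and concatenates them, computing diagonal
-- partners directly as l = j ± |i-k| (O(n^3)) instead of A's O(n^4) pair scan; faster.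

-- ===== PORT A =====
def generate_n_queens_kb (n : Int) : List String :=
  let kb : List String := []
  -- at least one queen in each row and column
  let kb := (PySem.List.pyRange 1 (n + 1) 1).foldl (fun kb i =>
    let row_clause := "(or " ++ PySem.Str.join " " ((PySem.List.pyRange 1 (n + 1) 1).map (fun j => ("Q" ++ PySem.Int.toStr i ++ PySem.Int.toStr j))) ++ ")"
    let kb := kb ++ [row_clause]
    let col_clause := "(or " ++ PySem.Str.join " " ((PySem.List.pyRange 1 (n + 1) 1).map (fun j => ("Q" ++ PySem.Int.toStr j ++ PySem.Int.toStr i))) ++ ")"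
    kb ++ [col_clause]) kb
  -- no two queens in the same row or column
  let kb := (PySem.List.pyRange 1 (n + 1) 1).foldl (fun kb i =>
    (PySem.List.pyRange 1 n 1).foldl (fun kb j =>
      (PySem.List.pyRange (j + 1) (n + 1) 1).foldl (fun kb k =>
        let kb := kb ++ ["(or (not " ++ ("Q" ++ PySem.Int.toStr i ++ PySem.Int.toStr j) ++ ") (not " ++ ("Q" ++ PySem.Int.toStr i ++ PySem.Int.toStr k) ++ "))"]
        kb ++ ["(or (not " ++ ("Q" ++ PySem.Int.toStr j ++ PySem.Int.toStr i) ++ ") (not " ++ ("Q" ++ PySem.Int.toStr k ++ PySem.Int.toStr i) ++ "))"]) kb) kb) kb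
  -- no two queens in the same diagonal
  let kb := (PySem.List.pyRange 1 (n + 1) 1).foldl (fun kb i =>
    (PySem.List.pyRange 1 (n + 1) 1).foldl (fun kb j =>
      (PySem.List.pyRange 1 (n + 1) 1).foldl (fun kb k =>
        (PySem.List.pyRange 1 (n + 1) 1).foldl (fun kb l =>
          if (i - k).natAbs = (j - l).natAbs ∧ (i ≠ k ∧ j ≠ l) then
            kb ++ ["(or (not " ++ ("Q" ++ PySem.Int.toStr i ++ PySem.Int.toStr j) ++ ") (not " ++ ("Q" ++ PySem.Int.toStr k ++ PySem.Int.toStr l) ++ "))"]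
          else kb) kb) kb) kb) kb
  kb

-- ===== PORT B =====
-- helper excl(a, b) of Source B
def pvExcl (a b : String) : String := "(or (not " ++ a ++ ") (not " ++ b ++ "))"

-- helper for the atom f'Q{i}{j}'
def pvQ (i j : Int) : String := "Q" ++ PySem.Int.toStr i ++ PySem.Int.toStr j

def generate_n_queens_kb_alt (n : Int) : List String :=
  let rng := PySem.List.pyRange 1 (n + 1) 1
  let part1 := rng.flatMap (fun i =>
    ["(or " ++ PySem.Str.join " " (rng.map (fun j => pvQ i j)) ++ ")",
     "(or " ++ PySem.Str.join " " (rng.map (fun j => pvQ j i)) ++ ")"])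
  let part2 := rng.flatMap (fun i =>
    (PySem.List.pyRange 1 n 1).flatMap (fun j =>
      (PySem.List.pyRange (j + 1) (n + 1) 1).flatMap (fun k =>
        [pvExcl (pvQ i j) (pvQ i k), pvExcl (pvQ j i) (pvQ k i)])))
  let part3 := rng.flatMap (fun i =>
    rng.flatMap (fun j =>
      rng.flatMap (fun k =>
        if k ≠ i then
          ([j - ((i - k).natAbs : Int), j + ((i - k).natAbs : Int)].filter
              (fun l => decide (1 ≤ l ∧ l ≤ n))).map (fun l => pvExcl (pvQ i j) (pvQ k l))
        else [])))
  part1 ++ part2 ++ part3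

-- ===== PRECONDITION & SPEC =====
def Spec_generate_n_queens_kb (n : Int) (out : List String) : Prop := out = generate_n_queens_kb_alt n
instance (n : Int) (out : List String) : Decidable (Spec_generate_n_queens_kb n out) := by unfold Spec_generate_n_queens_kb; infer_instance

-- ===== CLAIM =====
def Claim_equal_generate_n_queens_kb : Prop := ∀ (n : Int), Dom_generate_n_queens_kb n → Spec_generate_n_queens_kb n (generate_n_queens_kb n)

-- ===== LEMMAS AND PROOFS =====

-- lift a per-element 'kb ++ g x' step to flatMap, through membership-congruence
theorem foldl_lift {α β : Type} (xs : List α) (g : α → List β) (F : List β → α → List β)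
    (h : ∀ (kb : List β) (x : α), F kb x = kb ++ g x) (kb : List β) :
    xs.foldl F kb = kb ++ xs.flatMap g := by
  induction xs generalizing kb with
  | nil => simp
  | cons x t ih => rw [List.foldl_cons, h, ih]; simp

theorem eq_of_mem_iff_pairwise_lt {xs ys : List Int} (hx : xs.Pairwise (· < ·)) (hy : ys.Pairwise (· < ·))
    (h : ∀ a, a ∈ xs ↔ a ∈ ys) : xs = ys := by
  have hp : xs.Perm ys := by
    apply List.perm_of_nodup_nodup_toFinset_eq (hx.nodup) (hy.nodup)
    ext a; simp [List.mem_toFinset, h]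
  exact hp.eq_of_pairwise (fun a b _ _ h1 h2 => by omega) hx hy

-- A's diagonal test over the full column range selects exactly B's two candidate columns
theorem diag_filter (n i j k : Int) :
    (PySem.List.pyRange 1 (n + 1) 1).filter
        (fun l => decide ((i - k).natAbs = (j - l).natAbs ∧ (i ≠ k ∧ j ≠ l))) =
    (if k ≠ i then
      [j - ((i - k).natAbs : Int), j + ((i - k).natAbs : Int)].filter
        (fun l => decide (1 ≤ l ∧ l ≤ n))
     else []) := by
  by_cases hik : k = i
  · subst hik
    simp
  · simp only [ne_eq, hik, not_false_eq_true, if_true]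
    apply eq_of_mem_iff_pairwise_lt
    · exact (PySem.List.pairwise_lt_pyRange_one 1 (n + 1)).filter _
    · have habs : 0 < |i - k| := abs_pos.mpr (sub_ne_zero.mpr (fun h => hik h.symm))
      exact List.Pairwise.filter _ (by simp; linarith)
    · intro a
      simp only [List.mem_filter, PySem.List.mem_pyRange_one, decide_eq_true_eq,
        List.mem_cons, List.not_mem_nil, or_false]
      constructor
      · rintro ⟨⟨h1, h2⟩, hd, hik2, hjl⟩
        refine ⟨by omega, by omega⟩
      · rintro ⟨(rfl | rfl), h1, h2⟩ <;>
          exact ⟨⟨by omega, by omega⟩, by omega, hik ∘ Eq.symm, by omega⟩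

-- A's first loop: rows/columns at-least-one clauses, as a flatMap
theorem sec1 (n : Int) (kb : List String) :
    (PySem.List.pyRange 1 (n + 1) 1).foldl (fun kb i =>
      kb ++ ["(or " ++ PySem.Str.join " " ((PySem.List.pyRange 1 (n + 1) 1).map (fun j => ("Q" ++ PySem.Int.toStr i ++ PySem.Int.toStr j))) ++ ")"]
         ++ ["(or " ++ PySem.Str.join " " ((PySem.List.pyRange 1 (n + 1) 1).map (fun j => ("Q" ++ PySem.Int.toStr j ++ PySem.Int.toStr i))) ++ ")"]) kb =
    kb ++ (PySem.List.pyRange 1 (n + 1) 1).flatMap (fun i =>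
      ["(or " ++ PySem.Str.join " " ((PySem.List.pyRange 1 (n + 1) 1).map (fun j => ("Q" ++ PySem.Int.toStr i ++ PySem.Int.toStr j))) ++ ")",
       "(or " ++ PySem.Str.join " " ((PySem.List.pyRange 1 (n + 1) 1).map (fun j => ("Q" ++ PySem.Int.toStr j ++ PySem.Int.toStr i))) ++ ")"]) := by
  apply foldl_lift; intro kb i
  simp

-- A's second loop nest: same-row/column pair clauses, as nested flatMaps
theorem sec2 (n : Int) (kb : List String) :
    (PySem.List.pyRange 1 (n + 1) 1).foldl (fun kb i =>
      (PySem.List.pyRange 1 n 1).foldl (fun kb j =>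
        (PySem.List.pyRange (j + 1) (n + 1) 1).foldl (fun kb k =>
          kb ++ ["(or (not " ++ ("Q" ++ PySem.Int.toStr i ++ PySem.Int.toStr j) ++ ") (not " ++ ("Q" ++ PySem.Int.toStr i ++ PySem.Int.toStr k) ++ "))"]
             ++ ["(or (not " ++ ("Q" ++ PySem.Int.toStr j ++ PySem.Int.toStr i) ++ ") (not " ++ ("Q" ++ PySem.Int.toStr k ++ PySem.Int.toStr i) ++ "))"]) kb) kb) kb =
    kb ++ (PySem.List.pyRange 1 (n + 1) 1).flatMap (fun i =>
      (PySem.List.pyRange 1 n 1).flatMap (fun j =>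
        (PySem.List.pyRange (j + 1) (n + 1) 1).flatMap (fun k =>
          ["(or (not " ++ ("Q" ++ PySem.Int.toStr i ++ PySem.Int.toStr j) ++ ") (not " ++ ("Q" ++ PySem.Int.toStr i ++ PySem.Int.toStr k) ++ "))",
           "(or (not " ++ ("Q" ++ PySem.Int.toStr j ++ PySem.Int.toStr i) ++ ") (not " ++ ("Q" ++ PySem.Int.toStr k ++ PySem.Int.toStr i) ++ "))"]))) :=
 by
  apply foldl_lift; intro kb i
  apply foldl_lift; intro kb j
  apply foldl_lift; intro kb k
  simp

-- A's third loop nest: the O(n^4) diagonal scan collapses to B's two-candidate flatMap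
theorem sec3 (n : Int) (kb : List String) :
    (PySem.List.pyRange 1 (n + 1) 1).foldl (fun kb i =>
      (PySem.List.pyRange 1 (n + 1) 1).foldl (fun kb j =>
        (PySem.List.pyRange 1 (n + 1) 1).foldl (fun kb k =>
          (PySem.List.pyRange 1 (n + 1) 1).foldl (fun kb l =>
            if (i - k).natAbs = (j - l).natAbs ∧ (i ≠ k ∧ j ≠ l) then
              kb ++ ["(or (not " ++ ("Q" ++ PySem.Int.toStr i ++ PySem.Int.toStr j) ++ ") (not " ++ ("Q" ++ PySem.Int.toStr k ++ PySem.Int.toStr l) ++ "))"]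
            else kb) kb) kb) kb) kb =
    kb ++ (PySem.List.pyRange 1 (n + 1) 1).flatMap (fun i =>
      (PySem.List.pyRange 1 (n + 1) 1).flatMap (fun j =>
        (PySem.List.pyRange 1 (n + 1) 1).flatMap (fun k =>
          if k ≠ i then
            ([j - ((i - k).natAbs : Int), j + ((i - k).natAbs : Int)].filter
                (fun l => decide (1 ≤ l ∧ l ≤ n))).map
              (fun l => "(or (not " ++ ("Q" ++ PySem.Int.toStr i ++ PySem.Int.toStr j) ++ ") (not " ++ ("Q" ++ PySem.Int.toStr k ++ PySem.Int.toStr l) ++ "))")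
          else []))) :=
 by
  apply foldl_lift; intro kb i
  apply foldl_lift; intro kb j
  apply foldl_lift; intro kb k
  rw [PySem.List.foldl_append_ite
      (fun l => (i - k).natAbs = (j - l).natAbs ∧ (i ≠ k ∧ j ≠ l))
      (fun l => "(or (not " ++ ("Q" ++ PySem.Int.toStr i ++ PySem.Int.toStr j) ++ ") (not " ++ ("Q" ++ PySem.Int.toStr k ++ PySem.Int.toStr l) ++ "))"),
    diag_filter n i j k]
  by_cases hk : k = i <;> simp [hk]

theorem main_eq (n : Int) : generate_n_queens_kb n = generate_n_queens_kb_alt n := by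
  unfold generate_n_queens_kb generate_n_queens_kb_alt pvExcl pvQ
  dsimp only
  rw [sec1, sec2, sec3]
  simp

-- ===== VERDICT =====
theorem generate_n_queens_kb_spec : Claim_equal_generate_n_queens_kb := by
  intro n _
  exact main_eq n
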